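-- pv_equiv track=rewrite | github.com/EdwardStables/chess | chess_game/logic/chess.py | iterate_board_diag
-- ===== SOURCE A (Python) =====
-- from operator import indexOf
--
-- CHESS_BOARD_LETTERS = ['a','b','c','d','e','f','g','h']
--
-- def iterate_board_diag(start, dir):
--     letter = start[0]
--     letter_ind = indexOf(CHESS_BOARD_LETTERS, letter)
--     num = int(start[1])
--     if dir == 0: #to top right
--         while letter_ind < len(CHESS_BOARD_LETTERS)-1 and num < 8:
--             yield CHESS_BOARD_LETTERS[(letter_ind := letter_ind+1)] + str(num:=num+1)
--     if dir == 1: #to bottom right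
--         while letter_ind < len(CHESS_BOARD_LETTERS)-1 and num > 1:
--             yield CHESS_BOARD_LETTERS[(letter_ind := letter_ind+1)] + str(num:=num-1)
--     if dir == 2: #to bottom left
--         while letter_ind > 0 and num > 1:
--             yield CHESS_BOARD_LETTERS[(letter_ind := letter_ind-1)] + str(num:=num-1)
--     if dir == 3: #to top left
--         while letter_ind > 0 and num < 8:
--             yield CHESS_BOARD_LETTERS[(letter_ind := letter_ind-1)] + str(num:=num+1)
-- ===== SOURCE B (Python) =====
-- CHESS_BOARD_LETTERS = ['a','b','c','d','e','f','g','h']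
--
-- _DIAG_STEPS = {0: (1, 1), 1: (1, -1), 2: (-1, -1), 3: (-1, 1)}
--
-- def iterate_board_diag(start, dir):
--     letter_ind = CHESS_BOARD_LETTERS.index(start[0])
--     num = int(start[1])
--     step = _DIAG_STEPS.get(dir)
--     if step is None:
--         return
--     dc, dr = step
--     steps = min(7 - letter_ind if dc == 1 else letter_ind,
--                 8 - num if dr == 1 else num - 1)
--     for i in range(1, steps + 1):
--         yield CHESS_BOARD_LETTERS[letter_ind + dc*i] + str(num + dr*i)
-- ===== Notes on version B (the rewrite author's own statement) =====
-- stated objective: simpler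
-- what changed: Replaces A's four guarded while-loops with stepping walrus assignments by a direction-to-step-vector table, a closed-form count of on-board steps (min of the distances to the two relevant edges), and a single range comprehension emitting the squares by index arithmetic.
import Mathlib
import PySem

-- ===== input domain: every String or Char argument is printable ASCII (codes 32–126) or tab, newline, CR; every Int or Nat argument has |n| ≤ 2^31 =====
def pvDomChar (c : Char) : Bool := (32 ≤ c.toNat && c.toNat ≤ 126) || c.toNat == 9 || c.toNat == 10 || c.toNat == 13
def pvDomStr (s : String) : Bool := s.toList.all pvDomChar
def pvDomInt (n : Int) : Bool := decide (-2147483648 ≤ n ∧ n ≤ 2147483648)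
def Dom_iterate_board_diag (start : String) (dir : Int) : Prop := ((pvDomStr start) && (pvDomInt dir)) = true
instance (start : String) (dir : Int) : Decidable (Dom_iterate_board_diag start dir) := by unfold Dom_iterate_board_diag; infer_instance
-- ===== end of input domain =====

-- B replaces A's four guarded while-loops by a direction→step-vector table, a closed-form
-- count of on-board steps (min distance to the two relevant edges) and one range map (objective: simpler).


-- ===== PORT A =====
-- module constant CHESS_BOARD_LETTERS (list of one-char strings), and the same letters as the
-- characters start[0] is compared against
def CHESS_BOARD_LETTERS : List String := ["a","b","c","d","e","f","g","h"]
def chessLetterChars : List Char := ['a','b','c','d','e','f','g','h']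

-- the four while-loops of A (the walrus updates become the recursive call's arguments)
def loopTR (li num : Int) : List String :=
  if h : li < 7 ∧ num < 8 then
    (PySem.List.pyGetD CHESS_BOARD_LETTERS (li + 1) "" ++ PySem.Int.toStr (num + 1)) :: loopTR (li + 1) (num + 1)
  else []
termination_by (7 - li).toNat
decreasing_by omega

def loopBR (li num : Int) : List String :=
  if h : li < 7 ∧ num > 1 then
    (PySem.List.pyGetD CHESS_BOARD_LETTERS (li + 1) "" ++ PySem.Int.toStr (num - 1)) :: loopBR (li + 1) (num - 1)
  else []
termination_by (7 - li).toNat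
decreasing_by omega

def loopBL (li num : Int) : List String :=
  if h : li > 0 ∧ num > 1 then
    (PySem.List.pyGetD CHESS_BOARD_LETTERS (li - 1) "" ++ PySem.Int.toStr (num - 1)) :: loopBL (li - 1) (num - 1)
  else []
termination_by li.toNat
decreasing_by omega

def loopTL (li num : Int) : List String :=
  if h : li > 0 ∧ num < 8 then
    (PySem.List.pyGetD CHESS_BOARD_LETTERS (li - 1) "" ++ PySem.Int.toStr (num + 1)) :: loopTL (li - 1) (num + 1)
  else []
termination_by li.toNat
decreasing_by omega

-- at most one of A's four 'if dir == k' bodies can run (dir is fixed), so they port as a chain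
def iterate_board_diag (start : String) (dir : Int) : List String :=
  match PySem.Str.pyGet? start 0 with          -- start[0]; none = IndexError
  | none => []
  | some letter =>
    match PySem.List.index? chessLetterChars letter with   -- indexOf; none = ValueError
    | none => []
    | some liN =>
      match PySem.Str.pyGet? start 1 with      -- start[1]; none = IndexError
      | none => []
      | some c1 =>
        match PySem.Int.ofChars? [c1] with     -- int(start[1]); none = ValueError
        | none => []
        | some num =>
          let li : Int := liN
          if dir = 0 then loopTR li num
          else if dir = 1 then loopBR li num
          else if dir = 2 then loopBL li num
          else if dir = 3 then loopTL li num
          else []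

-- ===== PORT B =====
def diagStepTable : PySem.Dict Int (Int × Int) :=
  PySem.Dict.ofList [(0, (1, 1)), (1, (1, -1)), (2, (-1, -1)), (3, (-1, 1))]

def iterate_board_diag_alt (start : String) (dir : Int) : List String :=
  match PySem.Str.pyGet? start 0 with
  | none => []
  | some letter =>
    match PySem.List.index? chessLetterChars letter with
    | none => []
    | some liN =>
      match PySem.Str.pyGet? start 1 with
      | none => []
      | some c1 =>
        match PySem.Int.ofChars? [c1] with
        | none => []
        | some num =>
          let li : Int := liN
          match PySem.Dict.get? diagStepTable dir with
          | none => []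
          | some (dc, dr) =>
            let steps : Int := min (if dc = 1 then 7 - li else li)
                                   (if dr = 1 then 8 - num else num - 1)
            (PySem.List.pyRange 1 (steps + 1) 1).map fun i =>
              PySem.List.pyGetD CHESS_BOARD_LETTERS (li + dc * i) "" ++ PySem.Int.toStr (num + dr * i)

-- ===== PRECONDITION & SPEC =====
-- Pre_ excludes exactly the inputs where A raises: start needs at least 2 characters (IndexError),
-- start[0] must be one of a..h (ValueError from indexOf) and start[1] a decimal digit (ValueError from int).
def Pre_iterate_board_diag (start : String) (dir : Int) : Prop :=
  (match start.toList with
   | c0 :: c1 :: _ => decide ('a' ≤ c0) && decide (c0 ≤ 'h') && decide ('0' ≤ c1) && decide (c1 ≤ '9')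
   | _ => false) = true
instance (start : String) (dir : Int) : Decidable (Pre_iterate_board_diag start dir) := by
  unfold Pre_iterate_board_diag; infer_instance

def pvWitness_iterate_board_diag : String × Int := ("c2", 0)

def Spec_iterate_board_diag (start : String) (dir : Int) (out : List String) : Prop := out = iterate_board_diag_alt start dir
instance (start : String) (dir : Int) (out : List String) : Decidable (Spec_iterate_board_diag start dir out) := by unfold Spec_iterate_board_diag; infer_instance

-- ===== CLAIM (what is proved, stated in full; the proofs are below) =====
def Claim_equal_iterate_board_diag : Prop := ∀ (start : String) (dir : Int), Dom_iterate_board_diag start dir → Pre_iterate_board_diag start dir → Spec_iterate_board_diag start dir (iterate_board_diag start dir)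

-- ===== LEMMAS AND PROOFS =====

-- the common value both programs compute: k diagonal steps from (li, num) with step vector (dc, dr)
def diagChain (dc dr li num : Int) : Nat → List String
  | 0 => []
  | k + 1 =>
      (PySem.List.pyGetD CHESS_BOARD_LETTERS (li + dc) "" ++ PySem.Int.toStr (num + dr))
        :: diagChain dc dr (li + dc) (num + dr) k

theorem loopTR_chain (k : Nat) : ∀ li num : Int, (min (7 - li) (8 - num)).toNat = k →
    loopTR li num = diagChain 1 1 li num k := by
  induction k with
  | zero =>
    intro li num h
    rw [loopTR, dif_neg (by omega)]; rfl
  | succ k ih =>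
    intro li num h
    rw [loopTR, dif_pos (by omega : li < 7 ∧ num < 8)]
    exact congrArg _ (ih (li + 1) (num + 1) (by omega))

theorem loopBR_chain (k : Nat) : ∀ li num : Int, (min (7 - li) (num - 1)).toNat = k →
    loopBR li num = diagChain 1 (-1) li num k := by
  induction k with
  | zero =>
    intro li num h
    rw [loopBR, dif_neg (by omega)]; rfl
  | succ k ih =>
    intro li num h
    rw [loopBR, dif_pos (by omega : li < 7 ∧ num > 1)]
    rw [show num - 1 = num + -1 from by ring]
    exact congrArg _ (ih (li + 1) (num + -1) (by omega))

theorem loopBL_chain (k : Nat) : ∀ li num : Int, (min li (num - 1)).toNat = k →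
    loopBL li num = diagChain (-1) (-1) li num k := by
  induction k with
  | zero =>
    intro li num h
    rw [loopBL, dif_neg (by omega)]; rfl
  | succ k ih =>
    intro li num h
    rw [loopBL, dif_pos (by omega : li > 0 ∧ num > 1)]
    rw [show li - 1 = li + -1 from by ring, show num - 1 = num + -1 from by ring]
    exact congrArg _ (ih (li + -1) (num + -1) (by omega))

theorem loopTL_chain (k : Nat) : ∀ li num : Int, (min li (8 - num)).toNat = k →
    loopTL li num = diagChain (-1) 1 li num k := by
  induction k with
  | zero =>
    intro li num h
    rw [loopTL, dif_neg (by omega)]; rfl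
  | succ k ih =>
    intro li num h
    rw [loopTL, dif_pos (by omega : li > 0 ∧ num < 8)]
    rw [show li - 1 = li + -1 from by ring]
    exact congrArg _ (ih (li + -1) (num + 1) (by omega))

theorem map_range_chain (dc dr : Int) (k : Nat) : ∀ li num : Int,
    ((List.range k).map fun j : Nat =>
        PySem.List.pyGetD CHESS_BOARD_LETTERS (li + dc * ((j : Int) + 1)) ""
          ++ PySem.Int.toStr (num + dr * ((j : Int) + 1)))
      = diagChain dc dr li num k := by
  induction k with
  | zero => intro li num; rfl
  | succ k ih =>
    intro li num
    rw [List.range_succ_eq_map]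
    simp only [List.map_cons, List.map_map]
    refine congrArg₂ _ (by norm_num) ?_
    rw [← ih (li + dc) (num + dr)]
    apply List.map_congr_left
    intro j _
    simp only [Function.comp_apply]
    push_cast
    ring_nf

theorem alt_map_chain (dc dr li num steps : Int) :
    ((PySem.List.pyRange 1 (steps + 1) 1).map fun i =>
        PySem.List.pyGetD CHESS_BOARD_LETTERS (li + dc * i) ""
          ++ PySem.Int.toStr (num + dr * i))
      = diagChain dc dr li num steps.toNat := by
  rw [PySem.List.pyRange_one]
  rw [show (steps + 1 - 1).toNat = steps.toNat from by omega,
      List.map_map, ← map_range_chain dc dr steps.toNat li num]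
  apply List.map_congr_left
  intro j _
  simp only [Function.comp_apply]
  ring_nf

theorem table_none (dir : Int) (h0 : dir ≠ 0) (h1 : dir ≠ 1) (h2 : dir ≠ 2) (h3 : dir ≠ 3) :
    PySem.Dict.get? diagStepTable dir = none := by
  rw [show diagStepTable = PySem.Dict.mk [(0,(1,1)),(1,(1,-1)),(2,(-1,-1)),(3,(-1,1))] from by decide]
  simp [beq_iff_eq, Ne.symm h0, Ne.symm h1, Ne.symm h2, Ne.symm h3, PySem.Dict.get?]

-- ===== VERDICT (by name: the statement is the Claim_ definition above) =====
theorem iterate_board_diag_spec : Claim_equal_iterate_board_diag := by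
  intro start dir _ _
  unfold Spec_iterate_board_diag iterate_board_diag iterate_board_diag_alt
  cases PySem.Str.pyGet? start 0 with
  | none => rfl
  | some letter =>
  simp only
  cases PySem.List.index? chessLetterChars letter with
  | none => rfl
  | some liN =>
  simp only
  cases PySem.Str.pyGet? start 1 with
  | none => rfl
  | some c1 =>
  simp only
  cases PySem.Int.ofChars? [c1] with
  | none => rfl
  | some num =>
  simp only
  by_cases h0 : dir = 0
  · subst h0
    rw [show PySem.Dict.get? diagStepTable 0 = some (1, 1) from by decide]
    simp only
    rw [alt_map_chain]
    norm_num
    exact loopTR_chain _ _ _ rfl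
  by_cases h1 : dir = 1
  · subst h1
    rw [show PySem.Dict.get? diagStepTable 1 = some (1, -1) from by decide]
    simp only
    rw [alt_map_chain]
    norm_num
    exact loopBR_chain _ _ _ rfl
  by_cases h2 : dir = 2
  · subst h2
    rw [show PySem.Dict.get? diagStepTable 2 = some (-1, -1) from by decide]
    simp only
    rw [alt_map_chain]
    norm_num
    exact loopBL_chain _ _ _ rfl
  by_cases h3 : dir = 3
  · subst h3
    rw [show PySem.Dict.get? diagStepTable 3 = some (-1, 1) from by decide]
    simp only
    rw [alt_map_chain]
    norm_num
    exact loopTL_chain _ _ _ rfl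
  · rw [table_none dir h0 h1 h2 h3]
    simp only [if_neg h0, if_neg h1, if_neg h2, if_neg h3]
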